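-- pv_equiv track=rewrite | github.com/TangJayce/PaperProgram | GA.py | cal_pop_fitness
-- ===== SOURCE A (Python) =====
-- def cal_pop_fitness(population: list, fitness: list, size: int) -> list:
--     s = []
--     for index, value in enumerate(fitness):
--         s.append([index, value])
--     s.sort(key=(lambda x: x[1]), reverse=True)
--     pop_chromosome = []
--     for i in range(size):
--         index = s[i][0]
--         if index < len(population):
--             pop_chromosome.append(population[index])
--         else:
--             pop_chromosome.append([])
--     return pop_chromosome
-- ===== SOURCE B (Python) =====
-- def cal_pop_fitness(population: list, fitness: list, size: int) -> list:
--     # Repeated max-selection: no sort; each round pick the best remaining index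
--     # (first occurrence on ties, exactly like a stable descending sort would).
--     remaining = list(range(len(fitness)))
--     pop_chromosome = []
--     for _ in range(size):
--         best = remaining[0]
--         for j in remaining:
--             if fitness[j] > fitness[best]:
--                 best = j
--         remaining.remove(best)
--         pop_chromosome.append(population[best] if best < len(population) else [])
--     return pop_chromosome
-- ===== Notes on version B (the rewrite author's own statement) =====
-- stated objective: alternative
-- what changed: Replaced build-index/value-pairs + full stable reverse sort + indexed lookup loop by sort-free repeated max-selection over a shrinking list of remaining indices (first occurrence wins ties, matching the stable sort).
import Mathlib
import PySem

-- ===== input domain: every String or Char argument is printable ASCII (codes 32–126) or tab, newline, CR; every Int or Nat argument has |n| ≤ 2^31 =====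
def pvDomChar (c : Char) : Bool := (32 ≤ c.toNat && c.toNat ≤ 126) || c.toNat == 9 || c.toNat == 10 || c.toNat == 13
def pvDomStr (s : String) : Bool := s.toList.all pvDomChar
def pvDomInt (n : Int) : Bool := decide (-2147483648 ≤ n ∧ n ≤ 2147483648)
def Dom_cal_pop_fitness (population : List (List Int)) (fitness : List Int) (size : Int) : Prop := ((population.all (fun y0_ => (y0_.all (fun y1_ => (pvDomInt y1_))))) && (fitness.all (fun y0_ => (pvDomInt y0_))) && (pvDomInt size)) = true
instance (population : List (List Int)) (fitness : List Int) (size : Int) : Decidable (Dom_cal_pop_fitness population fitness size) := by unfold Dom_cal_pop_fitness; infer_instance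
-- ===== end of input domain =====

-- B replaces A's full stable reverse sort with sort-free repeated max-selection
-- over a shrinking list of remaining indices (same values, same tie order).

-- ===== PORT A =====
def cal_pop_fitness (population : List (List Int)) (fitness : List Int) (size : Int) : List (List Int) :=
  -- s = [[index, value] for index, value in enumerate(fitness)]
  let s := (PySem.List.enumerate fitness 0).foldl (fun acc p => acc ++ [p]) []
  -- s.sort(key=lambda x: x[1], reverse=True)
  let s2 := PySem.List.sorted s (fun x => x.2) true
  -- for i in range(size): …  (s[i] raises IndexError when size > len(fitness): excluded by Pre_)
  (PySem.List.pyRange 0 size 1).foldl (fun acc i =>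
    let index := (PySem.List.pyGetD s2 i ((0 : Int), (0 : Int))).1
    if index < (population.length : Int) then
      acc ++ [PySem.List.pyGetD population index []]
    else
      acc ++ [[]]) []

-- ===== PORT B =====
-- inner loop of Source B: best = remaining[0]; for j in remaining: if fitness[j] > fitness[best]: best = j
def pvSelect (fitness : List Int) (rem : List Int) : Int :=
  rem.foldl (fun b j => if PySem.List.pyGetD fitness b 0 < PySem.List.pyGetD fitness j 0 then j else b)
    (PySem.List.pyGetD rem 0 0)

-- one iteration of Source B's outer loop (remaining[0] / remove raise only outside Pre_)
def pvStep (population : List (List Int)) (fitness : List Int)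
    (st : List Int × List (List Int)) : List Int × List (List Int) :=
  let best := pvSelect fitness st.1
  let rem := (PySem.List.remove? st.1 best).getD st.1
  (rem, st.2 ++ [if best < (population.length : Int) then PySem.List.pyGetD population best [] else []])

def cal_pop_fitness_alt (population : List (List Int)) (fitness : List Int) (size : Int) : List (List Int) :=
  ((PySem.List.pyRange 0 size 1).foldl (fun st _ => pvStep population fitness st)
      (PySem.List.pyRange 0 (fitness.length : Int) 1, [])).2

-- ===== PRECONDITION & SPEC =====
-- A raises IndexError (s[i] out of range) exactly when size > len(fitness); nothing else is excluded.
def Pre_cal_pop_fitness (population : List (List Int)) (fitness : List Int) (size : Int) : Prop :=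
  size ≤ (fitness.length : Int)
instance (population : List (List Int)) (fitness : List Int) (size : Int) : Decidable (Pre_cal_pop_fitness population fitness size) := by unfold Pre_cal_pop_fitness; infer_instance

def pvWitness_cal_pop_fitness : List (List Int) × List Int × Int := ([[1, 2], [3, 4]], [5, 9], 2)

def Spec_cal_pop_fitness (population : List (List Int)) (fitness : List Int) (size : Int) (out : List (List Int)) : Prop := out = cal_pop_fitness_alt population fitness size
instance (population : List (List Int)) (fitness : List Int) (size : Int) (out : List (List Int)) : Decidable (Spec_cal_pop_fitness population fitness size out) := by unfold Spec_cal_pop_fitness; infer_instance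

-- ===== CLAIM (what is proved, stated in full; the proofs are below) =====
def Claim_equal_cal_pop_fitness : Prop := ∀ (population : List (List Int)) (fitness : List Int) (size : Int), Dom_cal_pop_fitness population fitness size → Pre_cal_pop_fitness population fitness size → Spec_cal_pop_fitness population fitness size (cal_pop_fitness population fitness size)

-- ===== LEMMAS AND PROOFS =====

-- the strict order in which A's stable reverse sort lists the (index, value) pairs
def pvR (a b : Int × Int) : Prop := b.2 < a.2 ∨ (a.2 = b.2 ∧ a.1 < b.1)

lemma pv_insertBy_nil {α : Type} (before : α → α → Bool) (x : α) :
    PySem.List.insertBy before x [] = [x] := rfl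

lemma pv_insertBy_cons {α : Type} (before : α → α → Bool) (x y : α) (ys : List α) :
    PySem.List.insertBy before x (y :: ys) =
      if before x y then x :: y :: ys else y :: PySem.List.insertBy before x ys := rfl

lemma pv_ins_pairwise (x : Int × Int) (acc : List (Int × Int))
    (hp : acc.Pairwise pvR) (hlt : ∀ y ∈ acc, y.1 < x.1) :
    (PySem.List.insertBy (fun a b => decide (b.2 < a.2)) x acc).Pairwise pvR := by
  induction acc with
  | nil => simp [pv_insertBy_nil]
  | cons y ys ih =>
    rw [pv_insertBy_cons]
    rcases List.pairwise_cons.1 hp with ⟨hy, hys⟩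
    by_cases hlt2 : y.2 < x.2
    · rw [if_pos (by simpa using hlt2)]
      refine List.pairwise_cons.2 ⟨?_, hp⟩
      intro z hz
      rcases List.mem_cons.1 hz with rfl | hz
      · exact Or.inl hlt2
      · rcases hy z hz with h | ⟨h1, h2⟩
        · exact Or.inl (lt_trans h hlt2)
        · exact Or.inl (h1 ▸ hlt2)
  -- x.2 ≤ y.2: x goes further right; y stays in front, and pvR y x holds (strictly smaller
  -- value, or equal value and earlier original index)
    · rw [if_neg (by simpa using hlt2)]
      refine List.pairwise_cons.2 ⟨?_, ih hys (fun z hz => hlt z (List.mem_cons_of_mem _ hz))⟩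
      intro z hz
      rcases (PySem.List.mem_insertBy _ _ _ _).1 hz with rfl | hz
      · rcases lt_or_eq_of_le (not_lt.1 hlt2) with h | h
        · exact Or.inl h
        · exact Or.inr ⟨h.symm, hlt y (List.mem_cons_self) ⟩
      · exact hy z hz

lemma pv_stab_aux : ∀ (xs acc : List (Int × Int)),
    acc.Pairwise pvR → (∀ y ∈ acc, ∀ z ∈ xs, y.1 < z.1) →
    xs.Pairwise (fun a b => a.1 < b.1) →
    (xs.foldl (fun acc x => PySem.List.insertBy (fun a b => decide (b.2 < a.2)) x acc) acc).Pairwise pvR := by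
  intro xs
  induction xs with
  | nil => intro acc hp _ _; simpa using hp
  | cons x xs ih =>
    intro acc hp hlt hxs
    rcases List.pairwise_cons.1 hxs with ⟨hx, hxs'⟩
    simp only [List.foldl_cons]
    refine ih _ (pv_ins_pairwise x acc hp (fun y hy => hlt y hy x List.mem_cons_self)) ?_ hxs'
    intro y hy z hz
    rcases (PySem.List.mem_insertBy _ _ _ _).1 hy with rfl | hy
    · exact hx z hz
    · exact hlt y hy z (List.mem_cons_of_mem _ hz)

lemma pv_stab (fit : List Int) :
    (PySem.List.sorted (PySem.List.enumerate fit 0) (fun p => p.2) true).Pairwise pvR := by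
  rw [PySem.List.sorted_rev_eq_foldl_insertBy]
  exact pv_stab_aux _ [] (by simp) (by simp) (PySem.List.pairwise_lt_enumerate fit 0)

-- the scan 'best = head; for j: if g j > g best: best = j' returns the first maximiser
lemma pv_foldmax (g : Int → Int) : ∀ (c : List Int) (b t : Int),
    (b :: c).Pairwise (· < ·) → t ∈ b :: c →
    (∀ j ∈ b :: c, g j ≤ g t) → (∀ j ∈ b :: c, g j = g t → t ≤ j) →
    c.foldl (fun x j => if g x < g j then j else x) b = t := by
  intro c
  induction c with
  | nil =>
    intro b t _ ht _ _
    simp only [List.foldl_nil]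
    simpa using (List.mem_singleton.1 ht).symm
  | cons j c ih =>
    intro b t hp ht hmax htie
    have hbj : b < j := (List.pairwise_cons.1 hp).1 j List.mem_cons_self
    simp only [List.foldl_cons]
    by_cases hg : g b < g j
    · rw [if_pos hg]
      have htb : t ≠ b := by
        rintro rfl
        exact absurd (hmax j (by simp)) (not_le.2 hg)
      refine ih j t (hp.sublist (List.sublist_cons_self _ _)) ?_ ?_ ?_
      · rcases List.mem_cons.1 ht with rfl | ht
        · exact absurd rfl htb
        · exact ht
      · intro i hi; exact hmax i (List.mem_cons_of_mem _ hi)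
      · intro i hi h; exact htie i (List.mem_cons_of_mem _ hi) h
    · rw [if_neg hg]
      have htj : t ≠ j := by
        rintro rfl
        have h1 : g b ≤ g t := hmax b List.mem_cons_self
        have h2 : g b = g t := le_antisymm h1 (not_lt.1 hg)
        have := htie b List.mem_cons_self h2
        omega
      have hsub : (b :: c).Sublist (b :: j :: c) := by
        exact List.cons_sublist_cons.2 (List.sublist_cons_self _ _)
      refine ih b t (hp.sublist hsub) ?_ ?_ ?_
      · rcases List.mem_cons.1 ht with rfl | ht
        · exact List.mem_cons_self
        · rcases List.mem_cons.1 ht with rfl | ht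
          · exact absurd rfl htj
          · exact List.mem_cons_of_mem _ ht
      · intro i hi; exact hmax i (hsub.mem hi)
      · intro i hi h; exact htie i (hsub.mem hi) h

-- basic facts about L = sorted(enumerate(fitness), key=snd, reverse=True)
lemma pv_L_len (fit : List Int) :
    (PySem.List.sorted (PySem.List.enumerate fit 0) (fun p => p.2) true).length = fit.length := by
  rw [PySem.List.length_sorted, PySem.List.length_enumerate]

lemma pv_L_mem (fit : List Int) (p : Int × Int)
    (hp : p ∈ PySem.List.sorted (PySem.List.enumerate fit 0) (fun p => p.2) true) :
    PySem.List.pyGetD fit p.1 0 = p.2 := by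
  rw [PySem.List.mem_sorted] at hp
  rcases (PySem.List.mem_enumerate_iff _ _ _).1 hp with ⟨k, hk, rfl⟩
  simp [List.getElem?_eq_getElem hk]

lemma pv_copy {α : Type} : ∀ (xs acc : List α), xs.foldl (fun a p => a ++ [p]) acc = acc ++ xs := by
  intro xs
  induction xs with
  | nil => simp
  | cons x xs ih => intro acc; simp [List.foldl_cons, ih]

lemma pv_Aloop (pop : List (List Int)) (L : List (Int × Int)) :
    ∀ (ws : List Int) (acc : List (List Int)),
    ws.foldl (fun acc i =>
        let index := (PySem.List.pyGetD L i ((0 : Int), (0 : Int))).1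
        if index < (pop.length : Int) then
          acc ++ [PySem.List.pyGetD pop index []]
        else
          acc ++ [[]]) acc
      = acc ++ ws.map (fun i =>
          if (PySem.List.pyGetD L i ((0 : Int), (0 : Int))).1 < (pop.length : Int) then
            PySem.List.pyGetD pop (PySem.List.pyGetD L i ((0 : Int), (0 : Int))).1 []
          else []) := by
  intro ws
  induction ws with
  | nil => intro acc; simp
  | cons w ws ih =>
    intro acc
    simp only [List.foldl_cons, List.map_cons]
    rw [show (let index := (PySem.List.pyGetD L w ((0 : Int), (0 : Int))).1;
        if index < (pop.length : Int) then acc ++ [PySem.List.pyGetD pop index []] else acc ++ [[]])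
      = acc ++ [if (PySem.List.pyGetD L w ((0 : Int), (0 : Int))).1 < (pop.length : Int) then
          PySem.List.pyGetD pop (PySem.List.pyGetD L w ((0 : Int), (0 : Int))).1 [] else []] from by
        simp only []; split_ifs <;> rfl]
    rw [ih]
    simp

lemma pv_take {α : Type} : ∀ (m : Nat) (xs : List α) (d : α), m ≤ xs.length →
    (PySem.List.pyRange 0 (m : Int) 1).map (fun i => PySem.List.pyGetD xs i d) = xs.take m := by
  intro m
  induction m with
  | zero => intro xs d _; simp [PySem.List.pyRange_one_eq_nil]
  | succ m ih =>
    intro xs d h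
    have h0 : (0 : Int) ≤ (m : Int) := by positivity
    rw [show ((m + 1 : Nat) : Int) = (m : Int) + 1 by push_cast; ring,
      PySem.List.pyRange_one_succ_right h0, List.map_append, ih xs d (by omega)]
    have hm : m < xs.length := by omega
    rw [List.take_succ]
    simp [PySem.List.pyGetD_natCast, List.getD_eq_getElem _ _ hm, List.getElem?_eq_getElem hm]

-- the B loop invariant: with 'rem' an ascending permutation of the indices of L.drop k,
-- m further rounds of selection output exactly rows k, k+1, …, k+m-1 of L
lemma pv_loop (pop : List (List Int)) (fit : List Int) :
    ∀ (ws : List Int) (k : Nat) (rem : List Int) (out : List (List Int)),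
    k + ws.length ≤ fit.length →
    rem.Perm (((PySem.List.sorted (PySem.List.enumerate fit 0) (fun p => p.2) true).drop k).map Prod.fst) →
    rem.Pairwise (· < ·) →
    (ws.foldl (fun st _ => pvStep pop fit st) (rem, out)).2
      = out ++ (((PySem.List.sorted (PySem.List.enumerate fit 0) (fun p => p.2) true).drop k).take ws.length).map
          (fun p => if p.1 < (pop.length : Int) then PySem.List.pyGetD pop p.1 [] else []) := by
  intro ws
  induction ws with
  | nil => intro k rem out _ _ _; simp
  | cons w ws ih =>
    intro k rem out hlen hperm hasc
    set L := PySem.List.sorted (PySem.List.enumerate fit 0) (fun p => p.2) true with hLdef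
    have hkL : k < L.length := by rw [pv_L_len]; simp at hlen; omega
    have hdrop : L.drop k = L[k] :: L.drop (k + 1) := List.drop_eq_getElem_cons hkL
    -- rem is nonempty
    have hperm' : rem.Perm (L[k].1 :: (L.drop (k + 1)).map Prod.fst) := by
      rw [← List.map_cons, ← hdrop]; exact hperm
    obtain ⟨b, c, rfl⟩ : ∃ b c, rem = b :: c := by
      rcases rem with _ | ⟨b, c⟩
      · exact absurd hperm'.symm (by simp)
      · exact ⟨b, c, rfl⟩
    -- pairwise order facts on the tail of L
    have hpairR : (L.drop k).Pairwise pvR := (pv_stab fit).sublist (List.drop_sublist _ _)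
    rw [hdrop] at hpairR
    rcases List.pairwise_cons.1 hpairR with ⟨hhead, _⟩
    have hgLk : PySem.List.pyGetD fit L[k].1 0 = L[k].2 :=
      pv_L_mem fit L[k] (List.getElem_mem hkL)
    -- the selection scan returns L[k].1
    have hsel : pvSelect fit (b :: c) = L[k].1 := by
      unfold pvSelect
      rw [PySem.List.pyGetD_zero_cons, List.foldl_cons]
      have hmem : L[k].1 ∈ b :: c := hperm'.mem_iff.2 List.mem_cons_self
      have hmax : ∀ j ∈ b :: c, PySem.List.pyGetD fit j 0 ≤ PySem.List.pyGetD fit L[k].1 0 := by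
        intro j hj
        rcases List.mem_map.1 (hperm.subset hj) with ⟨q, hq, rfl⟩
        rcases List.mem_cons.1 (hdrop ▸ hq) with rfl | hq'
        · exact le_refl _
        · rw [hgLk, pv_L_mem fit q (List.mem_of_mem_drop hq)]
          rcases hhead q hq' with h | ⟨h, _⟩
          · exact le_of_lt h
          · exact le_of_eq h.symm
      have htie : ∀ j ∈ b :: c, PySem.List.pyGetD fit j 0 = PySem.List.pyGetD fit L[k].1 0 → L[k].1 ≤ j := by
        intro j hj heq
        rcases List.mem_map.1 (hperm.subset hj) with ⟨q, hq, rfl⟩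
        rcases List.mem_cons.1 (hdrop ▸ hq) with rfl | hq'
        · exact le_refl _
        · rw [hgLk, pv_L_mem fit q (List.mem_of_mem_drop hq)] at heq
          rcases hhead q hq' with h | ⟨_, h⟩
          · omega
          · exact le_of_lt h
      -- the first iteration of the scan (j = b) leaves best = b
      rw [show (if PySem.List.pyGetD fit b 0 < PySem.List.pyGetD fit b 0 then b else b) = b by simp]
      exact pv_foldmax (fun j => PySem.List.pyGetD fit j 0) c b L[k].1 hasc hmem hmax htie
    have hmemrem : L[k].1 ∈ b :: c := hperm'.mem_iff.2 List.mem_cons_self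
    have hstep : pvStep pop fit (b :: c, out) =
        ((b :: c).erase L[k].1,
          out ++ [if L[k].1 < (pop.length : Int) then PySem.List.pyGetD pop L[k].1 [] else []]) := by
      rw [show pvStep pop fit (b :: c, out) =
          ((PySem.List.remove? (b :: c) (pvSelect fit (b :: c))).getD (b :: c),
            out ++ [if pvSelect fit (b :: c) < (pop.length : Int) then
              PySem.List.pyGetD pop (pvSelect fit (b :: c)) [] else []]) from rfl,
        hsel, PySem.List.remove?_eq_some_erase _ _ hmemrem]
      rfl
    rw [List.foldl_cons, hstep,
      ih (k + 1) _ _ (by simp at hlen ⊢; omega)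
        (by
          have := hperm'.erase L[k].1
          rwa [List.erase_cons_head] at this)
        (hasc.sublist (List.erase_sublist))]
    rw [List.append_assoc]
    congr 1
    rw [List.length_cons,
      show List.take (ws.length + 1) (List.drop k L) = L[k] :: List.take ws.length (List.drop (k + 1) L) from by
        rw [hdrop]; rfl]
    rfl

-- ===== VERDICT (by name: the statement is the Claim_ definition above) =====
theorem cal_pop_fitness_spec : Claim_equal_cal_pop_fitness := by
  intro pop fit size _ hpre
  unfold Spec_cal_pop_fitness cal_pop_fitness cal_pop_fitness_alt
  simp only []
  set L := PySem.List.sorted (PySem.List.enumerate fit 0) (fun p => p.2) true with hLdef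
  have hcopy : (PySem.List.enumerate fit 0).foldl (fun acc p => acc ++ [p]) [] =
      PySem.List.enumerate fit 0 := by rw [pv_copy]; simp
  have hpre' : size.toNat ≤ fit.length := by
    unfold Pre_cal_pop_fitness at hpre; omega
  -- A's side: rows 0 … size-1 of L, mapped
  have hrange : PySem.List.pyRange 0 size 1 = PySem.List.pyRange 0 ((size.toNat : Nat) : Int) 1 := by
    rcases (by omega : size ≤ 0 ∨ 0 < size) with h | h
    · rw [PySem.List.pyRange_one_eq_nil h, PySem.List.pyRange_one_eq_nil (by omega)]
    · rw [Int.toNat_of_nonneg (le_of_lt h)]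
  have hA : (PySem.List.pyRange 0 size 1).foldl (fun acc i =>
        let index := (PySem.List.pyGetD L i ((0 : Int), (0 : Int))).1
        if index < (pop.length : Int) then
          acc ++ [PySem.List.pyGetD pop index []]
        else
          acc ++ [[]]) []
      = (L.take size.toNat).map
          (fun p => if p.1 < (pop.length : Int) then PySem.List.pyGetD pop p.1 [] else []) := by
    rw [pv_Aloop, hrange, List.nil_append,
      show (fun i =>
          if (PySem.List.pyGetD L i ((0 : Int), (0 : Int))).1 < (pop.length : Int) then
            PySem.List.pyGetD pop (PySem.List.pyGetD L i ((0 : Int), (0 : Int))).1 []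
          else []) = (fun p => if p.1 < (pop.length : Int) then PySem.List.pyGetD pop p.1 [] else []) ∘
            (fun i => PySem.List.pyGetD L i ((0 : Int), (0 : Int))) from rfl,
      ← List.map_map, pv_take size.toNat L _ (by rw [pv_L_len]; exact hpre')]
  rw [hcopy, hA]
  -- B's side via the loop invariant at k = 0
  have hwslen : (PySem.List.pyRange 0 size 1).length = size.toNat := by
    rw [PySem.List.length_pyRange_one]; simp
  have hperm0 : (PySem.List.pyRange 0 (fit.length : Int) 1).Perm (((L.drop 0)).map Prod.fst) := by
    rw [List.drop_zero]
    have h1 : (L.map Prod.fst).Perm ((PySem.List.enumerate fit 0).map Prod.fst) :=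
      (PySem.List.sorted_perm _ _ _).map _
    have h2 : (PySem.List.enumerate fit 0).map Prod.fst = PySem.List.pyRange 0 (fit.length : Int) 1 := by
      rw [show (PySem.List.enumerate fit 0).map Prod.fst = (PySem.List.enumerate fit 0).map (·.1) from rfl,
        PySem.List.map_fst_enumerate]
      norm_num
    exact (h2 ▸ h1).symm
  rw [pv_loop pop fit (PySem.List.pyRange 0 size 1) 0 _ []
      (by rw [hwslen]; omega) hperm0 (PySem.List.pairwise_lt_pyRange_one _ _)]
  rw [hwslen, List.drop_zero, List.nil_append]
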